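-- pv_equiv track=rewrite | github.com/onatozmenn/istanbul-parking-heatmap | scripts/fetch_ispark_data.py | generate_enforcement
-- ===== SOURCE A (Python) =====
-- def parse_work_hours(wh: str):
--     """Çalışma saati string'ini (start_hour, end_hour) tuple'ına çevir"""
--     if not wh or "24 Saat" in wh:
--         return (0, 24)
--     try:
--         parts = wh.split("-")
--         start = int(parts[0].split(":")[0])
--         end = int(parts[1].split(":")[0])
--         if end == 0:
--             end = 24
--         return (start, end)
--     except (ValueError, IndexError):
--         return (0, 24)
--
-- def generate_enforcement(work_hours: str) -> list:
--     """168 slotluk uygulama takvimi"""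
--     start_h, end_h = parse_work_hours(work_hours)
--     is_24h = (start_h == 0 and end_h == 24)
--     enforced = []
--     for dow in range(7):
--         for hour in range(24):
--             if is_24h:
--                 enforced.append(1)
--             elif start_h <= hour < end_h and dow < 6:  # Pazar kapalı varsayalım
--                 enforced.append(1)
--             else:
--                 enforced.append(0)
--     return enforced
-- ===== SOURCE B (Python) =====
-- def parse_work_hours(wh: str):
--     """Calisma saati string'ini (start_hour, end_hour) tuple'ina cevir"""
--     if not wh or "24 Saat" in wh:
--         return (0, 24)
--     try:
--         parts = wh.split("-")
--         start = int(parts[0].split(":")[0])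
--         end = int(parts[1].split(":")[0])
--         if end == 0:
--             end = 24
--         return (start, end)
--     except (ValueError, IndexError):
--         return (0, 24)
--
-- def generate_enforcement(work_hours: str) -> list:
--     """168 slotluk uygulama takvimi"""
--     start_h, end_h = parse_work_hours(work_hours)
--     if start_h == 0 and end_h == 24:
--         return [1] * 168
--     day = [1 if start_h <= h < end_h else 0 for h in range(24)]
--     return day * 6 + [0] * 24
-- ===== Notes on version B (the rewrite author's own statement) =====
-- stated objective: simpler
-- what changed: Instead of a 7x24 nested loop re-testing the enforcement condition on all 168 (day,hour) pairs, B returns [1]*168 for the 24h case and otherwise builds one 24-hour weekday pattern once and replicates it (6 weekdays + a zero Sunday block).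
import Mathlib
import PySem

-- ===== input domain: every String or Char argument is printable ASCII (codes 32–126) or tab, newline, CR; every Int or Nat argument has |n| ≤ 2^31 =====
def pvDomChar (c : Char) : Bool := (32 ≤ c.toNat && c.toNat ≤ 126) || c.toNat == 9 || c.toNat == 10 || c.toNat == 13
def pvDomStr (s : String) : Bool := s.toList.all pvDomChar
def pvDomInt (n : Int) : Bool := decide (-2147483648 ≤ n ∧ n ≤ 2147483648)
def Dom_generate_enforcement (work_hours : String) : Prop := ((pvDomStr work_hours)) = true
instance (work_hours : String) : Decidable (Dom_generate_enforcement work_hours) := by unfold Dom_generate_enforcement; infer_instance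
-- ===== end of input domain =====

-- B replaces the 7x24 loop with one precomputed 24-hour weekday pattern replicated into blocks (simpler).

-- ===== PORT A =====
-- shared helper: literal port of parse_work_hours (identical in Source A and Source B)
def parse_work_hours (wh : String) : Int × Int :=
  if wh = "" ∨ PySem.Str.isIn "24 Saat" wh then (0, 24)
  else
    match (do
      let parts ← PySem.Str.split? wh "-"
      let p0 ← PySem.List.pyGet? parts 0
      let c0 ← PySem.Str.split? p0 ":"
      let s0 ← PySem.List.pyGet? c0 0
      let start ← PySem.Int.ofStr? s0
      let p1 ← PySem.List.pyGet? parts 1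
      let c1 ← PySem.Str.split? p1 ":"
      let s1 ← PySem.List.pyGet? c1 0
      let ed ← PySem.Int.ofStr? s1
      pure (start, if ed = 0 then (24 : Int) else ed) : Option (Int × Int)) with
    | some r => r
    | none => (0, 24)

def generate_enforcement (work_hours : String) : List Int :=
  let se := parse_work_hours work_hours
  let start_h := se.1
  let end_h := se.2
  let is_24h : Bool := decide (start_h = 0 ∧ end_h = 24)
  (PySem.List.pyRange 0 7 1).foldl (fun acc dow =>
    (PySem.List.pyRange 0 24 1).foldl (fun acc hour =>
      if is_24h then acc ++ [(1 : Int)]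
      else if start_h ≤ hour ∧ hour < end_h ∧ dow < 6 then acc ++ [1]
      else acc ++ [0]) acc) []

-- ===== PORT B =====
def generate_enforcement_alt (work_hours : String) : List Int :=
  let se := parse_work_hours work_hours
  let start_h := se.1
  let end_h := se.2
  if start_h = 0 ∧ end_h = 24 then List.replicate 168 (1 : Int)
  else
    let day := (PySem.List.pyRange 0 24 1).map
      (fun h => if start_h ≤ h ∧ h < end_h then (1 : Int) else 0)
    (List.replicate 6 day).flatten ++ List.replicate 24 0

-- ===== PRECONDITION & SPEC =====
def Spec_generate_enforcement (work_hours : String) (out : List Int) : Prop := out = generate_enforcement_alt work_hours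
instance (work_hours : String) (out : List Int) : Decidable (Spec_generate_enforcement work_hours out) := by unfold Spec_generate_enforcement; infer_instance

-- ===== CLAIM (what is proved, stated in full; the proofs are below) =====
def Claim_equal_generate_enforcement : Prop := ∀ (work_hours : String), Dom_generate_enforcement work_hours → Spec_generate_enforcement work_hours (generate_enforcement work_hours)

-- ===== LEMMAS AND PROOFS =====
set_option maxRecDepth 8192 in
lemma gen_eq (s e : Int) :
    ((PySem.List.pyRange 0 7 1).foldl (fun acc dow =>
      (PySem.List.pyRange 0 24 1).foldl (fun acc hour =>
        if (decide (s = 0 ∧ e = 24) : Bool) then acc ++ [(1 : Int)]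
        else if s ≤ hour ∧ hour < e ∧ dow < 6 then acc ++ [1]
        else acc ++ [0]) acc) []) =
    (if s = 0 ∧ e = 24 then List.replicate 168 (1 : Int)
     else ((List.replicate 6 ((PySem.List.pyRange 0 24 1).map
        (fun h => if s ≤ h ∧ h < e then (1 : Int) else 0))).flatten ++ List.replicate 24 0)) := by
  have hfun : ∀ (dow : Int) (acc : List Int),
      (PySem.List.pyRange 0 24 1).foldl (fun acc hour =>
        if (decide (s = 0 ∧ e = 24) : Bool) then acc ++ [(1 : Int)]
        else if s ≤ hour ∧ hour < e ∧ dow < 6 then acc ++ [1]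
        else acc ++ [0]) acc
      = acc ++ (PySem.List.pyRange 0 24 1).map (fun hour =>
        if (decide (s = 0 ∧ e = 24) : Bool) then (1 : Int)
        else if s ≤ hour ∧ hour < e ∧ dow < 6 then 1 else 0) := by
    intro dow acc
    rw [← PySem.List.foldl_append_singleton_eq_map]
    apply PySem.List.foldl_congr_mem
    intro acc hour _
    split_ifs <;> rfl
  have houter :
      (PySem.List.pyRange 0 7 1).foldl (fun acc dow =>
        (PySem.List.pyRange 0 24 1).foldl (fun acc hour =>
          if (decide (s = 0 ∧ e = 24) : Bool) then acc ++ [(1 : Int)]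
          else if s ≤ hour ∧ hour < e ∧ dow < 6 then acc ++ [1]
          else acc ++ [0]) acc) []
      = (PySem.List.pyRange 0 7 1).flatMap (fun dow =>
          (PySem.List.pyRange 0 24 1).map (fun hour =>
            if (decide (s = 0 ∧ e = 24) : Bool) then (1 : Int)
            else if s ≤ hour ∧ hour < e ∧ dow < 6 then 1 else 0)) := by
    rw [show (PySem.List.pyRange 0 7 1).flatMap (fun dow =>
          (PySem.List.pyRange 0 24 1).map (fun hour =>
            if (decide (s = 0 ∧ e = 24) : Bool) then (1 : Int)
            else if s ≤ hour ∧ hour < e ∧ dow < 6 then 1 else 0))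
        = [] ++ (PySem.List.pyRange 0 7 1).flatMap (fun dow =>
          (PySem.List.pyRange 0 24 1).map (fun hour =>
            if (decide (s = 0 ∧ e = 24) : Bool) then (1 : Int)
            else if s ≤ hour ∧ hour < e ∧ dow < 6 then 1 else 0))
        from (List.nil_append _).symm,
      ← PySem.List.foldl_append_eq_flatMap]
    apply PySem.List.foldl_congr_mem
    intro acc dow _
    exact hfun dow acc
  rw [houter]
  have h7 : PySem.List.pyRange 0 7 1 = [0,1,2,3,4,5,6] := by decide
  have hr : PySem.List.pyRange 0 24 1 =
      [0,1,2,3,4,5,6,7,8,9,10,11,12,13,14,15,16,17,18,19,20,21,22,23] := by decide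
  by_cases h24 : s = 0 ∧ e = 24
  · obtain ⟨rfl, rfl⟩ := h24
    decide
  · rw [if_neg h24, decide_eq_false h24]
    simp only [h7, hr, List.flatMap_cons, List.flatMap_nil, List.map_cons, List.map_nil,
      List.replicate, List.flatten, List.append_nil, Bool.false_eq_true, if_false]
    norm_num
-- ===== VERDICT (by name: the statement is the Claim_ definition above) =====
theorem generate_enforcement_spec : Claim_equal_generate_enforcement := by
  intro wh _
  unfold Spec_generate_enforcement generate_enforcement generate_enforcement_alt
  exact gen_eq (parse_work_hours wh).1 (parse_work_hours wh).2
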